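-- pv_equiv track=rewrite | github.com/mnazzaro/Schedule-Maker-UMD | logic.py | get_dept
-- ===== SOURCE A (Python) =====
-- def get_dept(course):
--     dept = ""
--     for char in course:
--         if(char.isdigit()):
--             return dept
--         else:
--             dept += char
--
--     return "Not a course"
-- ===== SOURCE B (Python) =====
-- import itertools
--
-- def get_dept(course):
--     if not any(c.isdigit() for c in course):
--         return "Not a course"
--     return ''.join(itertools.takewhile(lambda c: not c.isdigit(), course))
-- ===== Notes on version B (the rewrite author's own statement) =====
-- stated objective: simpler
-- what changed: Replaces the single accumulate-and-return-inside loop with two separate passes: an any()-digit existence scan deciding the no-digit sentinel case, then a takewhile prefix extraction.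
import Mathlib
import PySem

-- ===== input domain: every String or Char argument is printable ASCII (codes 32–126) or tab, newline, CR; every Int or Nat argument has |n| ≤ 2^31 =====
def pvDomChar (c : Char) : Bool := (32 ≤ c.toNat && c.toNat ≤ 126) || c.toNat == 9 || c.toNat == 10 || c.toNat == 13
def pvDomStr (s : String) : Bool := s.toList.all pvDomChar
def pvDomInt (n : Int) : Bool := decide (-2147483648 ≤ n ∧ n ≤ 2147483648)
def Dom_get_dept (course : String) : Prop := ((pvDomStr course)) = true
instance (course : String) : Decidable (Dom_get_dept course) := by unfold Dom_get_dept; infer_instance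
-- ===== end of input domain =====

-- B replaces A's accumulate-and-return-inside loop by two passes (an any-digit scan, then a takewhile prefix); same values everywhere.

-- ===== PORT A =====
-- A's for-loop with accumulator `dept` and early return on the first digit.
def getDeptLoop (dept : List Char) : List Char → String
  | [] => "Not a course"
  | c :: cs => if PySem.Chars.isdigit c then String.mk dept else getDeptLoop (dept ++ [c]) cs

def get_dept (course : String) : String := getDeptLoop [] course.toList

-- ===== PORT B =====
def get_dept_alt (course : String) : String :=
  if course.toList.any PySem.Chars.isdigit then
    String.mk (course.toList.takeWhile (fun c => !PySem.Chars.isdigit c))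
  else "Not a course"

-- ===== PRECONDITION & SPEC =====
def Spec_get_dept (course : String) (out : String) : Prop := out = get_dept_alt course
instance (course : String) (out : String) : Decidable (Spec_get_dept course out) := by unfold Spec_get_dept; infer_instance

-- ===== CLAIM (what is proved, stated in full; the proofs are below) =====
def Claim_equal_get_dept : Prop := ∀ (course : String), Dom_get_dept course → Spec_get_dept course (get_dept course)

-- ===== LEMMAS AND PROOFS =====
theorem getDeptLoop_eq (cs : List Char) : ∀ dept : List Char,
    getDeptLoop dept cs =
      if cs.any PySem.Chars.isdigit then
        String.mk (dept ++ cs.takeWhile (fun c => !PySem.Chars.isdigit c))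
      else "Not a course" := by
  induction cs with
  | nil => intro dept; simp [getDeptLoop]
  | cons c cs ih =>
    intro dept
    by_cases h : PySem.Chars.isdigit c
    · simp [getDeptLoop, h, List.takeWhile]
    · simp only [getDeptLoop, h, if_false, ih, List.any_cons, Bool.false_or,
        List.takeWhile, Bool.not_eq_true] at *
      simp [h]

-- ===== VERDICT (by name: the statement is the Claim_ definition above) =====
theorem get_dept_spec : Claim_equal_get_dept := by
  intro course _
  unfold Spec_get_dept get_dept get_dept_alt
  simp [getDeptLoop_eq]
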